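-- pv_equiv track=rewrite | github.com/jk-jung/problem-solving | codewars/6kyu/6_Arrays of cats and dogs.py | solve
-- ===== SOURCE A (Python) =====
-- def solve(v,n):
--     r = 0
--     for i, x in enumerate(v):
--         if x == 'D':
--             for j in range(i - n, i + n + 1):
--                 if 0 <= j and j < len(v) and v[j] == 'C':
--                     r += 1
--                     v[j] = 'X"'
--                     break
--     return r
-- ===== SOURCE B (Python) =====
-- def solve(v, n):
--     # One left-to-right pass with a monotone pointer into the precomputed list
--     # of cat positions; does not mutate v (A consumes cats by overwriting them).
--     cats = [j for j, x in enumerate(v) if x == 'C']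
--     r = 0
--     p = 0
--     for i, x in enumerate(v):
--         if x == 'D':
--             while p < len(cats) and cats[p] < i - n:
--                 p += 1
--             if p < len(cats) and cats[p] <= i + n:
--                 r += 1
--                 p += 1
--     return r
-- ===== Notes on version B (the rewrite author's own statement) =====
-- stated objective: alternative
-- what changed: Replaces the per-dog window scan over range(i-n, i+n+1) with a single monotone pointer over a precomputed list of cat indices (each cat index visited at most once), and drops the in-place mutation of v.
import Mathlib
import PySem

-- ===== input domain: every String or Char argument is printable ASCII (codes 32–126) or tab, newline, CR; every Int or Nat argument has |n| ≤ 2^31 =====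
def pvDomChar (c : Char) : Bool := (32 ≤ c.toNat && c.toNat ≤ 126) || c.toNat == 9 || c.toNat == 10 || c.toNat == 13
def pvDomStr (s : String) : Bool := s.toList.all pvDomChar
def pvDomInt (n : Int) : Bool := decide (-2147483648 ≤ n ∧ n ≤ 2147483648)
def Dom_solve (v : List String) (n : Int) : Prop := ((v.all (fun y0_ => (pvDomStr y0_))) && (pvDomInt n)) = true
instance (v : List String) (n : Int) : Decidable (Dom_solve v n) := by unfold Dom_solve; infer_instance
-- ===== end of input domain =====

-- B replaces A's per-dog window scan with one monotone pointer over the precomputed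
-- cat-index list (objective: alternative). A mutates its argument list in place; B does
-- not: the equivalence proved here is about the RETURN value only.

-- ===== PORT A =====
-- inner 'for j in range(...)' with break: returns the first j passing the guard
def solveFind (vc : List String) (len : Int) : List Int → Option Int
  | [] => none
  | j :: rest =>
    if 0 ≤ j ∧ j < len ∧ PySem.List.pyGet? vc j = some "C" then some j
    else solveFind vc len rest

-- outer loop over the (live, mutated) list: state (r, vc), reading vc at index i
def solveGoA (n : Int) : List Int → Int → List String → Int
  | [], r, _ => r
  | i :: rest, r, vc =>
    if PySem.List.pyGet? vc i = some "D" then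
      match solveFind vc (PySem.List.len vc) (PySem.List.pyRange (i - n) (i + n + 1) 1) with
      | some j => solveGoA n rest (r + 1) (PySem.List.pySetD vc j "X\"")
      | none => solveGoA n rest r vc
    else solveGoA n rest r vc

def solve (v : List String) (n : Int) : Int :=
  solveGoA n (PySem.List.pyRange 0 (PySem.List.len v) 1) 0 v

-- ===== PORT B =====
-- 'while p < len(cats) and cats[p] < low: p += 1'
def solveAdvance (cats : List Int) (low : Int) (p : Nat) : Nat :=
  if _h : p < cats.length ∧ cats.getD p 0 < low then solveAdvance cats low (p + 1)
  else p
termination_by cats.length - p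
decreasing_by omega

def solveGoB (cats : List Int) (n : Int) : List (Int × String) → Int → Nat → Int
  | [], r, _ => r
  | (i, x) :: rest, r, p =>
    if x = "D" then
      let p' := solveAdvance cats (i - n) p
      if p' < cats.length ∧ cats.getD p' 0 ≤ i + n then
        solveGoB cats n rest (r + 1) (p' + 1)
      else
        solveGoB cats n rest r p'
    else solveGoB cats n rest r p

def solve_alt (v : List String) (n : Int) : Int :=
  let cats := ((PySem.List.enumerate v 0).filter (fun q => q.2 == "C")).map (fun q => q.1)
  solveGoB cats n (PySem.List.enumerate v 0) 0 0

-- ===== PRECONDITION & SPEC =====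
def Spec_solve (v : List String) (n : Int) (out : Int) : Prop := out = solve_alt v n
instance (v : List String) (n : Int) (out : Int) : Decidable (Spec_solve v n out) := by unfold Spec_solve; infer_instance

-- ===== CLAIM (what is proved, stated in full; the proofs are below) =====
def Claim_equal_solve : Prop := ∀ (v : List String) (n : Int), Dom_solve v n → Spec_solve v n (solve v n)

-- ===== LEMMAS AND PROOFS =====
def catsOf (v : List String) : List Int :=
  ((PySem.List.enumerate v 0).filter (fun q => q.2 == "C")).map (fun q => q.1)

lemma solve_alt_eq (v : List String) (n : Int) :
    solve_alt v n = solveGoB (catsOf v) n (PySem.List.enumerate v 0) 0 0 := rfl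

lemma cats_mem (v : List String) (j : Int) :
    j ∈ catsOf v ↔ ∃ k : Nat, j = (k : Int) ∧ v[k]? = some "C" := by
  simp [catsOf, List.mem_filter, PySem.List.mem_enumerate_iff, List.getElem?_eq_some_iff]
lemma cats_sorted (v : List String) : (catsOf v).Pairwise (· < ·) := by
  exact ((PySem.List.pairwise_lt_enumerate v 0).filter _).map _ (fun a b h => h)

lemma findC_none (vc : List String) (len b : Int) :
    ∀ (k : Nat) (a : Int), (b - a).toNat ≤ k →
    (∀ j : Int, a ≤ j → j < b → ¬(0 ≤ j ∧ j < len ∧ PySem.List.pyGet? vc j = some "C")) →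
    solveFind vc len (PySem.List.pyRange a b 1) = none := by
  intro k
  induction k with
  | zero =>
    intro a hk _
    rw [PySem.List.pyRange_one_eq_nil (by omega)]; rfl
  | succ k ih =>
    intro a hk h
    by_cases hab : b ≤ a
    · rw [PySem.List.pyRange_one_eq_nil hab]; rfl
    · rw [PySem.List.pyRange_one_cons (by omega)]
      simp only [solveFind]
      rw [if_neg (h a le_rfl (by omega))]
      exact ih (a + 1) (by omega) (fun j h1 h2 => h j (by omega) h2)

lemma findC_some (vc : List String) (len b c : Int)
    (hc : 0 ≤ c ∧ c < len ∧ PySem.List.pyGet? vc c = some "C") (hcb : c < b) :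
    ∀ (k : Nat) (a : Int), (c - a).toNat ≤ k → a ≤ c →
    (∀ j : Int, a ≤ j → j < c → ¬(0 ≤ j ∧ j < len ∧ PySem.List.pyGet? vc j = some "C")) →
    solveFind vc len (PySem.List.pyRange a b 1) = some c := by
  intro k
  induction k with
  | zero =>
    intro a hk hac _
    have hac' : a = c := by omega
    subst hac'
    rw [PySem.List.pyRange_one_cons (by omega)]
    simp only [solveFind]
    rw [if_pos hc]
  | succ k ih =>
    intro a hk hac hmin
    by_cases hac : a = c
    · subst hac
      rw [PySem.List.pyRange_one_cons (by omega)]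
      simp only [solveFind]
      rw [if_pos hc]
    · rw [PySem.List.pyRange_one_cons (by omega)]
      simp only [solveFind]
      rw [if_neg (hmin a le_rfl (by omega))]
      exact ih (a + 1) (by omega) (by omega) (fun j h1 h2 => hmin j (by omega) h2)

lemma advance_spec (cats : List Int) (low : Int) :
    ∀ (p : Nat), p ≤ cats.length →
    p ≤ solveAdvance cats low p ∧ solveAdvance cats low p ≤ cats.length ∧
    (∀ j : Int, low ≤ j → (j ∈ cats.drop (solveAdvance cats low p) ↔ j ∈ cats.drop p)) ∧
    (solveAdvance cats low p < cats.length → low ≤ cats.getD (solveAdvance cats low p) 0) := by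
  intro p
  induction p using solveAdvance.induct cats low with
  | case1 p h ih =>
    intro hp
    rw [solveAdvance, dif_pos h]
    obtain ⟨h1, h2, h3, h4⟩ := ih (by omega)
    refine ⟨by omega, h2, ?_, h4⟩
    intro j hj
    rw [h3 j hj]
    have hd : cats.drop p = cats[p] :: cats.drop (p + 1) := (List.getElem_cons_drop h.1).symm
    have hgd : cats.getD p 0 = cats[p] := List.getD_eq_getElem cats 0 h.1
    rw [hd]
    simp only [List.mem_cons]
    constructor
    · exact Or.inr
    · rintro (he | hm)
      · omega
      · exact hm
  | case2 p h =>
    intro hp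
    rw [solveAdvance, dif_neg h]
    refine ⟨le_rfl, hp, fun j _ => Iff.rfl, ?_⟩
    intro hlt
    have := List.getD_eq_getElem cats 0 hlt
    omega

lemma cats_nonneg (v : List String) {j : Int} (hj : j ∈ catsOf v) : 0 ≤ j := by
  rw [cats_mem] at hj; obtain ⟨k, rfl, -⟩ := hj; exact Int.natCast_nonneg k

lemma goEq (v0 : List String) (n : Int) :
    ∀ (l : List (Int × String)) (low r : Int) (vc : List String) (p : Nat),
      l.Pairwise (fun a b => a.1 < b.1) →
      (∀ q ∈ l, (∃ k : Nat, q.1 = (k : Int) ∧ v0[k]? = some q.2) ∧ low ≤ q.1 - n) →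
      vc.length = v0.length →
      (∀ k : Nat, v0[k]? ≠ some "C" → vc[k]? = v0[k]?) →
      (∀ k : Nat, v0[k]? = some "C" → vc[k]? = some "C" ∨ vc[k]? = some "X\"") →
      (∀ j : Int, low ≤ j →
        ((0 ≤ j ∧ j < (v0.length : Int) ∧ vc[j.toNat]? = some "C") ↔ j ∈ (catsOf v0).drop p)) →
      p ≤ (catsOf v0).length →
      solveGoA n (l.map (fun q => q.1)) r vc = solveGoB (catsOf v0) n l r p := by
  intro l
  induction l with
  | nil => intro low r vc p _ _ _ _ _ _ _; rfl
  | cons q rest ih =>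
    obtain ⟨i, x⟩ := q
    intro low r vc p hpair hq hlen hI2 hI2b hI3 hp
    obtain ⟨⟨ki, hki, hv0i⟩, hlow⟩ := hq (i, x) (List.mem_cons_self ..)
    obtain ⟨hhead, htail⟩ := List.pairwise_cons.mp hpair
    -- the live-list dog test agrees with the original-list dog test
    have hdog : (PySem.List.pyGet? vc i = some "D") ↔ x = "D" := by
      subst hki
      rw [PySem.List.pyGet?_natCast]
      by_cases hC : v0[ki]? = some "C"
      · have hx : x = "C" := by rw [hC] at hv0i; exact (Option.some_inj.mp hv0i).symm
        rcases hI2b ki hC with h | h <;> rw [h] <;> simp [hx]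
      · rw [hI2 ki hC, hv0i]
        constructor
        · intro h; exact Option.some_inj.mp h
        · intro h; rw [h]
    -- the guard in solveFind, rephrased through the invariant's canonical form
    have hcond : ∀ j : Int,
        (0 ≤ j ∧ j < PySem.List.len vc ∧ PySem.List.pyGet? vc j = some "C") ↔
        (0 ≤ j ∧ j < (v0.length : Int) ∧ vc[j.toNat]? = some "C") := by
      intro j
      constructor
      · rintro ⟨h0, h1, h2⟩
        refine ⟨h0, ?_, ?_⟩
        · rw [PySem.List.len_eq, hlen] at h1; exact h1
        · rw [PySem.List.pyGet?_of_nonneg vc h0] at h2; exact h2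
      · rintro ⟨h0, h1, h2⟩
        refine ⟨h0, ?_, ?_⟩
        · rw [PySem.List.len_eq, hlen]; exact h1
        · rw [PySem.List.pyGet?_of_nonneg vc h0]; exact h2
    have hqrest : ∀ q ∈ rest,
        (∃ k : Nat, q.1 = (k : Int) ∧ v0[k]? = some q.2) ∧ (i - n + 1) ≤ q.1 - n := by
      intro q hq'
      exact ⟨(hq q (List.mem_cons_of_mem _ hq')).1, by have := hhead q hq'; omega⟩
    by_cases hx : x = "D"
    · -- dog step
      obtain ⟨ha1, ha2, ha3, ha4⟩ := advance_spec (catsOf v0) (i - n) p hp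
      set cats := catsOf v0 with hcats
      set p' := solveAdvance cats (i - n) p with hp'def
      have hI3' : ∀ j : Int, i - n ≤ j →
          ((0 ≤ j ∧ j < (v0.length : Int) ∧ vc[j.toNat]? = some "C") ↔ j ∈ cats.drop p') := by
        intro j hj
        exact (hI3 j (by omega)).trans (ha3 j hj).symm
      have hgoB : solveGoB cats n ((i, x) :: rest) r p =
          (if p' < cats.length ∧ cats.getD p' 0 ≤ i + n then
            solveGoB cats n rest (r + 1) (p' + 1)
          else solveGoB cats n rest r p') := by
        simp only [solveGoB, if_pos hx]
        rfl
      have hgoA : solveGoA n (((i, x) :: rest).map (fun q => q.1)) r vc =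
          (if PySem.List.pyGet? vc i = some "D" then
            match solveFind vc (PySem.List.len vc) (PySem.List.pyRange (i - n) (i + n + 1) 1) with
            | some j => solveGoA n (rest.map (fun q => q.1)) (r + 1) (PySem.List.pySetD vc j "X\"")
            | none => solveGoA n (rest.map (fun q => q.1)) r vc
          else solveGoA n (rest.map (fun q => q.1)) r vc) := by
        simp only [List.map_cons, solveGoA]
      rw [hgoA, if_pos (hdog.mpr hx), hgoB]
      by_cases hb : p' < cats.length ∧ cats.getD p' 0 ≤ i + n
      · -- a cat is caught
        rw [if_pos hb]
        obtain ⟨hp'len, hcub⟩ := hb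
        have hgd : cats.getD p' 0 = cats[p'] := List.getD_eq_getElem cats 0 hp'len
        set c : Int := cats[p'] with hcdef
        have hdropd : cats.drop p' = c :: cats.drop (p' + 1) := (List.getElem_cons_drop hp'len).symm
        have hcmem : c ∈ cats.drop p' := by rw [hdropd]; exact List.mem_cons_self ..
        have hclow : i - n ≤ c := by have := ha4 hp'len; omega
        have hPc := (hI3' c hclow).mpr hcmem
        obtain ⟨hc0, hclen, hcC⟩ := hPc
        have hpw : (cats.drop p').Pairwise (· < ·) :=
          (cats_sorted v0).sublist (List.drop_sublist ..)
        have hpwc : ∀ b ∈ cats.drop (p' + 1), c < b := by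
          rw [hdropd] at hpw; exact (List.pairwise_cons.mp hpw).1
        have hmin : ∀ j : Int, i - n ≤ j → j < c →
            ¬(0 ≤ j ∧ j < (v0.length : Int) ∧ vc[j.toNat]? = some "C") := by
          intro j hj hlt hP
          have hm := (hI3' j hj).mp hP
          rw [hdropd] at hm
          rcases List.mem_cons.mp hm with he | hm
          · omega
          · have := hpwc j hm; omega
        have hfind : solveFind vc (PySem.List.len vc)
            (PySem.List.pyRange (i - n) (i + n + 1) 1) = some c := by
          apply findC_some vc (PySem.List.len vc) (i + n + 1) c
            ((hcond c).mpr ⟨hc0, hclen, hcC⟩) (by omega) (c - (i - n)).toNat (i - n) le_rfl hclow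
          intro j h1 h2 hcondj
          exact hmin j h1 h2 ((hcond j).mp hcondj)
        rw [hfind]
        show solveGoA n (rest.map (fun q => q.1)) (r + 1) (PySem.List.pySetD vc c "X\"") =
          solveGoB cats n rest (r + 1) (p' + 1)
        have hset : PySem.List.pySetD vc c "X\"" = vc.set c.toNat "X\"" :=
          PySem.List.pySetD_of_nonneg vc "X\"" hc0
        rw [hset]
        have hcnat : c.toNat < vc.length := by rw [hlen]; omega
        have hv0c : v0[c.toNat]? = some "C" := by
          by_cases hC : v0[c.toNat]? = some "C"
          · exact hC
          · rw [hI2 c.toNat hC] at hcC; exact hcC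
        apply ih (i - n + 1) (r + 1) (vc.set c.toNat "X\"") (p' + 1) htail hqrest
        · rw [List.length_set]; exact hlen
        · intro k hk
          have hkc : k ≠ c.toNat := fun he => hk (he ▸ hv0c)
          rw [List.getElem?_set_ne (fun he => hkc he.symm)]
          exact hI2 k hk
        · intro k hk
          by_cases hkc : k = c.toNat
          · subst hkc
            right
            rw [List.getElem?_set_self hcnat]
          · rw [List.getElem?_set_ne (fun he => hkc he.symm)]
            exact hI2b k hk
        · intro j hj
          by_cases h0 : 0 ≤ j
          · by_cases hjc : j = c
            · subst hjc
              constructor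
              · rintro ⟨-, -, h2⟩
                rw [List.getElem?_set_self hcnat] at h2
                exact absurd (Option.some_inj.mp h2) (by decide)
              · intro hm
                exact absurd (hpwc c hm) (lt_irrefl c)
            · have hjcn : j.toNat ≠ c.toNat := by omega
              rw [List.getElem?_set_ne (fun he => hjcn he.symm)]
              rw [hI3' j (by omega), hdropd, List.mem_cons]
              constructor
              · rintro (he | hm)
                · exact absurd he hjc
                · exact hm
              · exact Or.inr
          · constructor
            · rintro ⟨h1, -, -⟩; omega
            · intro hm
              have := cats_nonneg v0 (List.mem_of_mem_drop hm)
              omega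
        · omega
      · -- no cat in the window
        rw [if_neg hb]
        push Not at hb
        have hnone : ∀ j : Int, i - n ≤ j → j < i + n + 1 →
            ¬(0 ≤ j ∧ j < PySem.List.len vc ∧ PySem.List.pyGet? vc j = some "C") := by
          intro j h1 h2 hcondj
          have hm := (hI3' j h1).mp ((hcond j).mp hcondj)
          by_cases hp'len : p' < cats.length
          · have hub := hb hp'len
            have hgd : cats.getD p' 0 = cats[p'] := List.getD_eq_getElem cats 0 hp'len
            have hdropd : cats.drop p' = cats[p'] :: cats.drop (p' + 1) :=
              (List.getElem_cons_drop hp'len).symm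
            have hpw : (cats.drop p').Pairwise (· < ·) :=
              (cats_sorted v0).sublist (List.drop_sublist ..)
            rw [hdropd] at hm hpw
            rcases List.mem_cons.mp hm with he | hm'
            · omega
            · have := (List.pairwise_cons.mp hpw).1 j hm'; omega
          · rw [List.drop_eq_nil_of_le (by omega)] at hm
            exact absurd hm (List.not_mem_nil)
        rw [findC_none vc (PySem.List.len vc) (i + n + 1) (i + n + 1 - (i - n)).toNat (i - n)
          le_rfl hnone]
        apply ih (i - n + 1) r vc p' htail hqrest hlen hI2 hI2b
        · intro j hj
          exact hI3' j (by omega)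
        · exact ha2
    · -- not a dog
      have hgoB : solveGoB (catsOf v0) n ((i, x) :: rest) r p = solveGoB (catsOf v0) n rest r p := by
        simp only [solveGoB, if_neg hx]
      have hgoA : solveGoA n (((i, x) :: rest).map (fun q => q.1)) r vc =
          solveGoA n (rest.map (fun q => q.1)) r vc := by
        simp only [List.map_cons, solveGoA]
        rw [if_neg (fun h => hx (hdog.mp h))]
      rw [hgoA, hgoB]
      apply ih (i - n + 1) r vc p htail hqrest hlen hI2 hI2b
      · intro j hj
        exact hI3 j (by omega)
      · exact hp

-- ===== VERDICT (by name: the statement is the Claim_ definition above) =====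
theorem solve_spec : Claim_equal_solve := by
  intro v n _
  show solve v n = solve_alt v n
  rw [solve_alt_eq]
  unfold solve
  have hmap : (PySem.List.enumerate v 0).map (fun q => q.1) =
      PySem.List.pyRange 0 (PySem.List.len v) 1 := by
    rw [PySem.List.map_fst_enumerate]
    simp [PySem.List.len_eq]
  rw [← hmap]
  apply goEq v n (PySem.List.enumerate v 0) (-n) 0 v 0 (PySem.List.pairwise_lt_enumerate v 0)
  · intro q hq
    rw [PySem.List.mem_enumerate_iff] at hq
    obtain ⟨k, hk, rfl⟩ := hq
    refine ⟨⟨k, by simp, by simp [List.getElem?_eq_getElem hk]⟩, by simp⟩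
  · rfl
  · intro k _; rfl
  · intro k hk; exact Or.inl hk
  · intro j _
    rw [List.drop_zero, cats_mem]
    constructor
    · rintro ⟨h0, h1, h2⟩
      exact ⟨j.toNat, by omega, h2⟩
    · rintro ⟨k, rfl, hC⟩
      have hk : k < v.length := (List.getElem?_eq_some_iff.mp hC).1
      exact ⟨by omega, by omega, by simpa using hC⟩
  · exact Nat.zero_le _
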